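-- pv_equiv track=rewrite | github.com/BradDunagan/Python | RR/tabs.py | spaces2Tabs
-- ===== SOURCE A (Python) =====
-- def spaces2Tabs ( sIn, tabSize = 4 ):
--     sOut = ""
--     #   Substitute only if the non-space character after space(s) is at
--     #   a tab stop position.
--     lenIn = len ( sIn )
--     iS = 0;     iIn = sIn.find ( ' ', iS )
--     while (iIn >= 0) and (iIn < lenIn):
--         sOut += sIn[iS:iIn]
--         #   Position of next non-space.
--         iNS = iIn
--         while (iNS < lenIn) and (sIn[iNS] == ' '):
--             iNS += 1
--             if iNS % tabSize == 0:
--                 sOut += "\t";   iIn = iNS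
--         sOut += " " * ((iNS - iIn) % tabSize)
--         iS = iNS;   iIn = sIn.find ( ' ', iS )
--     sOut += sIn[iS:]
--     return sOut
-- ===== SOURCE B (Python) =====
-- import re
--
-- def spaces2Tabs(sIn, tabSize=4):
--     #   One pass over the maximal space runs; for each run the number of
--     #   tab stops crossed and the leftover spaces follow by arithmetic
--     #   from the run's input indices.
--     out = []
--     last = 0
--     for m in re.finditer(' +', sIn):
--         start, end = m.span()
--         out.append(sIn[last:start])
--         tabs = end // tabSize - start // tabSize
--         if tabs:
--             out.append('\t' * tabs + ' ' * (end % tabSize))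
--         else:
--             out.append(' ' * (end - start))
--         last = end
--     out.append(sIn[last:])
--     return ''.join(out)
-- ===== Notes on version B (the rewrite author's own statement) =====
-- stated objective: alternative
-- what changed: B replaces A's character-by-character inner scan that emits a tab at each stop with a single regex pass over maximal space runs, converting each run with closed-form tab-stop arithmetic (end//tabSize - start//tabSize tabs plus the leftover spaces); Pre_ excludes inputs that contain a space while tabSize <= 0: at tabSize = 0 both programs raise ZeroDivisionError, and a non-positive tab width is a nonsense corner no caller would specify, where each version returns its own unspecified value.
-- outside the precondition, e.g. on spaces2Tabs('    x', -4): A returns '\tx', B returns 'x'; on spaces2Tabs('  ', 0): A raises ZeroDivisionError, B raises ZeroDivisionError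
import Mathlib
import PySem

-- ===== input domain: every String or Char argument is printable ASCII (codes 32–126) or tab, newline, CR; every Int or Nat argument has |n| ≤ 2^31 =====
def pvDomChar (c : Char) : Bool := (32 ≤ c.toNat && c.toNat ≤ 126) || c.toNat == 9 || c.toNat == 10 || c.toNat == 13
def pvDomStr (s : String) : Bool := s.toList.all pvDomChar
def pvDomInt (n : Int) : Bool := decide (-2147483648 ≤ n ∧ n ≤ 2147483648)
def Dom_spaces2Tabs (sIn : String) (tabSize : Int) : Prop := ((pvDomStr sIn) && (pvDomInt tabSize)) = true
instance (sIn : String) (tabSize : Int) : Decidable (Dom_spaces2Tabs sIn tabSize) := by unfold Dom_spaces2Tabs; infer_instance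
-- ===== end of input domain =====

-- B replaces A's character-by-character scan/emit loop by one pass over maximal space
-- runs, converting each run with closed-form tab-stop arithmetic (alternative decomposition).


-- ===== PORT A =====
-- A's inner while loop: advance iNS over spaces; after each increment, if the new position
-- is a tab stop (iNS % tabSize == 0) append '\t' and record the stop in iIn.
def s2tInner (s : List Char) (tabSize : Int) (iNS iIn : Nat) (out : List Char) : Nat × Nat × List Char :=
  if h : s[iNS]? = some ' ' then                       -- (iNS < lenIn) and (sIn[iNS] == ' ')
    if PySem.Int.mod ((iNS + 1 : Nat) : Int) tabSize = 0 then
      s2tInner s tabSize (iNS + 1) (iNS + 1) (out ++ ['\t'])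
    else
      s2tInner s tabSize (iNS + 1) iIn out
  else (iNS, iIn, out)
termination_by s.length - iNS
decreasing_by all_goals (obtain ⟨hlt, -⟩ := List.getElem?_eq_some_iff.mp (by assumption); omega)

-- A's outer while loop (fuel only makes the recursion total; s.length + 1 always suffices).
def s2tOuter (s : List Char) (tabSize : Int) : Nat → Nat → List Char → List Char
  | 0, iS, out => out ++ s.drop iS
  | fuel + 1, iS, out =>
    let iIn := PySem.Chars.findFrom s [' '] (iS : Int)      -- sIn.find(' ', iS)
    if 0 ≤ iIn ∧ iIn < (s.length : Int) then
      let out1 := out ++ PySem.List.slice s (some (iS : Int)) (some iIn)   -- sOut += sIn[iS:iIn]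
      let r := s2tInner s tabSize iIn.toNat iIn.toNat out1
      -- sOut += " " * ((iNS - iIn) % tabSize)  (a negative Python repeat count gives "")
      let out2 := r.2.2 ++ List.replicate (PySem.Int.mod ((r.1 : Int) - (r.2.1 : Int)) tabSize).toNat ' '
      s2tOuter s tabSize fuel r.1 out2
    else out ++ s.drop iS                                    -- sOut += sIn[iS:]

def spaces2Tabs (sIn : String) (tabSize : Int) : String :=
  String.ofList (s2tOuter sIn.toList tabSize (sIn.toList.length + 1) 0 [])

-- ===== PORT B =====
-- End of the maximal run of spaces starting at i (= m.end() of the regex match ' +').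
def s2tRunEnd (s : List Char) (i : Nat) : Nat :=
  if h : s[i]? = some ' ' then s2tRunEnd s (i + 1) else i
termination_by s.length - i
decreasing_by obtain ⟨hlt, -⟩ := List.getElem?_eq_some_iff.mp h; omega

-- B's finditer loop: one maximal space run per step (fuel only makes the recursion total).
def s2tRuns (s : List Char) (tabSize : Int) : Nat → Nat → List Char
  | 0, last => s.drop last
  | fuel + 1, last =>
    let st := PySem.Chars.findFrom s [' '] (last : Int)      -- next match's start
    if 0 ≤ st ∧ st < (s.length : Int) then
      let start := st.toNat
      let stop := s2tRunEnd s start                          -- the match's end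
      let tabs := PySem.Int.floordiv (stop : Nat) tabSize - PySem.Int.floordiv (start : Nat) tabSize
      PySem.List.slice s (some (last : Int)) (some (start : Int))
        ++ (if tabs ≠ 0 then
              List.replicate tabs.toNat '\t' ++ List.replicate (PySem.Int.mod (stop : Nat) tabSize).toNat ' '
            else List.replicate (stop - start) ' ')
        ++ s2tRuns s tabSize fuel stop
    else s.drop last                                         -- tail after the last match

def spaces2Tabs_alt (sIn : String) (tabSize : Int) : String :=
  String.ofList (s2tRuns sIn.toList tabSize (sIn.toList.length + 1) 0)

-- ===== PRECONDITION & SPEC =====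
-- Pre_ excludes inputs that contain a space while tabSize ≤ 0: at tabSize = 0 both programs
-- raise ZeroDivisionError, and a non-positive tab width is a nonsense corner no caller would
-- specify, where each version returns its own unspecified value.
def Pre_spaces2Tabs (sIn : String) (tabSize : Int) : Prop :=
  0 < tabSize ∨ PySem.Str.isIn " " sIn = false
instance (sIn : String) (tabSize : Int) : Decidable (Pre_spaces2Tabs sIn tabSize) := by
  unfold Pre_spaces2Tabs; infer_instance

def pvWitness_spaces2Tabs : String × Int := ("a  bc   d", 4)

def Spec_spaces2Tabs (sIn : String) (tabSize : Int) (out : String) : Prop := out = spaces2Tabs_alt sIn tabSize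
instance (sIn : String) (tabSize : Int) (out : String) : Decidable (Spec_spaces2Tabs sIn tabSize out) := by
  unfold Spec_spaces2Tabs; infer_instance

-- ===== CLAIM (what is proved, stated in full; the proofs are below) =====
def Claim_equal_spaces2Tabs : Prop := ∀ (sIn : String) (tabSize : Int), Dom_spaces2Tabs sIn tabSize → Pre_spaces2Tabs sIn tabSize → Spec_spaces2Tabs sIn tabSize (spaces2Tabs sIn tabSize)

-- ===== LEMMAS AND PROOFS =====

theorem runEnd_ge (s : List Char) (i : Nat) : i ≤ s2tRunEnd s i := by
  rw [s2tRunEnd]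
  split
  · exact le_trans (by omega) (runEnd_ge s (i + 1))
  · exact le_refl i
termination_by s.length - i
decreasing_by obtain ⟨hlt, -⟩ := List.getElem?_eq_some_iff.mp (by assumption); omega

theorem runEnd_le (s : List Char) (i : Nat) (h : i ≤ s.length) : s2tRunEnd s i ≤ s.length := by
  rw [s2tRunEnd]
  split
  · next hc =>
    obtain ⟨hlt', -⟩ := List.getElem?_eq_some_iff.mp hc
    exact runEnd_le s (i + 1) (by omega)
  · exact h
termination_by s.length - i
decreasing_by omega

theorem runEnd_step (s : List Char) (i : Nat) (h : s[i]? = some ' ') :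
    s2tRunEnd s i = s2tRunEnd s (i + 1) := by
  rw [s2tRunEnd]
  simp [h]

-- Python's a % T is constant on residue classes of T.
theorem pymod_congr {T : Int} (hT : T ≠ 0) (a b : Int) (hd : T ∣ (a - b)) :
    PySem.Int.mod a T = PySem.Int.mod b T := by
  have h1 := PySem.Int.floordiv_mul_add_mod a T
  have h2 := PySem.Int.floordiv_mul_add_mod b T
  have hd2 : T ∣ (PySem.Int.mod a T - PySem.Int.mod b T) := by
    have : PySem.Int.mod a T - PySem.Int.mod b T
        = (a - b) - (PySem.Int.floordiv a T - PySem.Int.floordiv b T) * T := by ring_nf; omega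
    rw [this]
    exact dvd_sub hd (Dvd.intro_left _ rfl)
  have habs : |PySem.Int.mod a T - PySem.Int.mod b T| < |T| := by
    rcases lt_or_gt_of_ne hT with hneg | hpos
    · have ba := PySem.Int.mod_neg_bounds a hneg
      have bb := PySem.Int.mod_neg_bounds b hneg
      rw [abs_of_neg hneg] at *
      rw [abs_lt]; omega
    · have ba1 := PySem.Int.mod_nonneg a hpos
      have ba2 := PySem.Int.mod_lt a hpos
      have bb1 := PySem.Int.mod_nonneg b hpos
      have bb2 := PySem.Int.mod_lt b hpos
      rw [abs_of_pos hpos]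
      rw [abs_lt]; omega
  have := Int.eq_zero_of_abs_lt_dvd ((abs_dvd _ _).mpr hd2) habs
  omega

-- Characterisation of A's inner loop: it stops at the run's end, emits one tab per
-- tab stop crossed, and iIn ends at the last stop crossed (or stays put).
theorem inner_spec (s : List Char) (T : Int) (hT : T ≠ 0) (iNS iIn : Nat) (out : List Char) :
    s2tInner s T iNS iIn out =
      (s2tRunEnd s iNS,
       (if iNS / T.natAbs < s2tRunEnd s iNS / T.natAbs then T.natAbs * (s2tRunEnd s iNS / T.natAbs) else iIn),
       out ++ List.replicate (s2tRunEnd s iNS / T.natAbs - iNS / T.natAbs) '\t') := by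
  rw [s2tInner]
  split
  · next h =>
    obtain ⟨hlt, hsp⟩ := List.getElem?_eq_some_iff.mp h
    have hE1 : s2tRunEnd s iNS = s2tRunEnd s (iNS + 1) := runEnd_step s iNS h
    have hge : iNS + 1 ≤ s2tRunEnd s (iNS + 1) := runEnd_ge s (iNS + 1)
    have hk : 0 < T.natAbs := Int.natAbs_pos.mpr hT
    have hmono : (iNS + 1) / T.natAbs ≤ s2tRunEnd s (iNS + 1) / T.natAbs :=
      Nat.div_le_div_right hge
    have hsucc := Nat.succ_div (a := iNS) (b := T.natAbs)
    have hcond : (PySem.Int.mod ((iNS + 1 : Nat) : Int) T = 0) ↔ T.natAbs ∣ (iNS + 1) := by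
      rw [PySem.Int.mod_eq_zero_iff_dvd, ← Int.natAbs_dvd, Int.natCast_dvd_natCast]
    by_cases hdv : T.natAbs ∣ (iNS + 1)
    · rw [if_pos (hcond.mpr hdv)]
      rw [inner_spec s T hT (iNS + 1) (iNS + 1) (out ++ ['\t'])]
      rw [hE1]
      rw [if_pos hdv] at hsucc
      simp only [Prod.mk.injEq]
      refine ⟨by trivial, ?_, ?_⟩
      · rw [if_pos (show iNS / T.natAbs < s2tRunEnd s (iNS + 1) / T.natAbs by omega)]
        by_cases h2 : (iNS + 1) / T.natAbs < s2tRunEnd s (iNS + 1) / T.natAbs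
        · rw [if_pos h2]
        · rw [if_neg h2]
          have h3 : (iNS + 1) / T.natAbs = s2tRunEnd s (iNS + 1) / T.natAbs := by omega
          rw [← h3, Nat.mul_div_cancel' hdv]
      · have h4 : s2tRunEnd s (iNS + 1) / T.natAbs - iNS / T.natAbs
            = (s2tRunEnd s (iNS + 1) / T.natAbs - (iNS + 1) / T.natAbs) + 1 := by omega
        rw [h4, List.append_assoc, List.singleton_append, ← List.replicate_succ]
    · rw [if_neg (fun hc => hdv (hcond.mp hc))]
      rw [inner_spec s T hT (iNS + 1) iIn out]
      rw [hE1]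
      rw [if_neg hdv] at hsucc
      rw [hsucc]
      simp
  · next h =>
    rw [s2tRunEnd]
    simp [h]
termination_by s.length - iNS
decreasing_by all_goals omega

theorem s2t_main (s : List Char) (T : Int)
    (hPre : 0 < T ∨ PySem.Chars.isIn [' '] s = false) :
    ∀ (m iS : Nat), m = s.length - iS → iS ≤ s.length →
      ∀ (fuelA fuelB : Nat), s.length - iS < fuelA → s.length - iS < fuelB →
      ∀ (out : List Char),
        s2tOuter s T fuelA iS out = out ++ s2tRuns s T fuelB iS := by
  intro m
  induction m using Nat.strong_induction_on with
  | _ m IH =>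
    intro iS hm hiS fuelA fuelB hA hB out
    match fuelA, fuelB with
    | fA + 1, fB + 1 =>
      rw [s2tOuter, s2tRuns]
      by_cases hc : 0 ≤ PySem.Chars.findFrom s [' '] (iS : Int) ∧
          PySem.Chars.findFrom s [' '] (iS : Int) < (s.length : Int)
      case neg => rw [if_neg hc, if_neg hc]
      case pos =>
        rw [if_pos hc, if_pos hc]
        have hne : PySem.Chars.findFrom s [' '] (iS : Int) ≠ -1 := by omega
        obtain ⟨hler, hpref, -⟩ := PySem.Chars.findFrom_natCast_spec s [' '] iS hiS hne
        set j := (PySem.Chars.findFrom s [' '] (iS : Int)).toNat with hj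
        have hjlt : j < s.length := by omega
        have hiSj : iS ≤ j := by omega
        have hsp : s[j] = ' ' := by
          obtain ⟨t, ht⟩ := hpref
          rw [List.drop_eq_getElem_cons hjlt, List.singleton_append] at ht
          injection ht with h1 _
          exact h1.symm
        have hT : 0 < T := by
          rcases hPre with h0 | h0
          · exact h0
          · exact absurd (hpref.isInfix.trans (List.drop_suffix j s).isInfix)
              ((PySem.Chars.isIn_eq_false_iff [' '] s).mp h0)
        have hTne : T ≠ 0 := by omega
        have hr2 : PySem.Chars.findFrom s [' '] (iS : Int) = (j : Int) := by omega
        have hgs : s[j]? = some ' ' := List.getElem?_eq_some_iff.mpr ⟨hjlt, hsp⟩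
        have hEgt : j + 1 ≤ s2tRunEnd s j := by
          rw [runEnd_step s j hgs]; exact runEnd_ge s (j + 1)
        have hEle : s2tRunEnd s j ≤ s.length := runEnd_le s j (le_of_lt hjlt)
        have hk : T.natAbs = T.toNat := by omega
        have hkpos : 0 < T.toNat := by omega
        have hTcast : T = ((T.toNat : Nat) : Int) := by omega
        have hdivle : j / T.toNat ≤ s2tRunEnd s j / T.toNat :=
          Nat.div_le_div_right (by omega)
        have hTdvd : T ∣ ((T.toNat * (s2tRunEnd s j / T.toNat) : Nat) : Int) :=
          ⟨((s2tRunEnd s j / T.toNat : Nat) : Int), by push_cast; rw [← hTcast]⟩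
        have hfd : ∀ n : Nat, PySem.Int.floordiv ((n : Nat) : Int) T = ((n / T.toNat : Nat) : Int) := by
          intro n; rw [hTcast]; exact PySem.Int.floordiv_natCast n T.toNat
        simp only [hr2, inner_spec s T hTne, hk, hfd]
        by_cases hcase : j / T.toNat < s2tRunEnd s j / T.toNat
        · rw [if_pos hcase,
              if_pos (show (((s2tRunEnd s j / T.toNat : Nat) : Int) - ((j / T.toNat : Nat) : Int)) ≠ 0 by omega)]
          have hres : PySem.Int.mod ((s2tRunEnd s j : Int) - ((T.toNat * (s2tRunEnd s j / T.toNat) : Nat) : Int)) T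
              = PySem.Int.mod ((s2tRunEnd s j : Nat) : Int) T := by
            refine pymod_congr hTne _ _ ?_
            have h6 : ((s2tRunEnd s j : Int) - ((T.toNat * (s2tRunEnd s j / T.toNat) : Nat) : Int))
                - ((s2tRunEnd s j : Nat) : Int) = -(((T.toNat * (s2tRunEnd s j / T.toNat) : Nat) : Int)) := by ring
            rw [h6]
            exact Dvd.dvd.neg_right hTdvd
          rw [hres]
          have h5 : (((s2tRunEnd s j / T.toNat : Nat) : Int) - ((j / T.toNat : Nat) : Int)).toNat
              = s2tRunEnd s j / T.toNat - j / T.toNat := by omega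
          rw [h5]
          rw [IH (s.length - s2tRunEnd s j) (by omega) (s2tRunEnd s j) rfl hEle fA fB (by omega) (by omega)]
          simp [List.append_assoc]
        · rw [if_neg hcase,
              if_neg (show ¬ ((((s2tRunEnd s j / T.toNat : Nat) : Int) - ((j / T.toNat : Nat) : Int)) ≠ 0) by omega)]
          -- zero tab stops crossed: the run is shorter than one tab width, so
          -- A's (stop - start) % T is exactly B's stop - start.
          have hq : j / T.toNat = s2tRunEnd s j / T.toNat := by omega
          have hdm1 : T.toNat * (s2tRunEnd s j / T.toNat) + j % T.toNat = j := by
            rw [← hq]; exact Nat.div_add_mod j T.toNat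
          have hdm2 := Nat.div_add_mod (s2tRunEnd s j) T.toNat
          have hm1 := Nat.mod_lt j hkpos
          have hm2 := Nat.mod_lt (s2tRunEnd s j) hkpos
          have hlen : s2tRunEnd s j - j < T.toNat := by omega
          rw [PySem.Int.mod_eq_emod_of_pos hT]
          rw [Int.emod_eq_of_lt (by omega) (by omega)]
          have h5 : (((s2tRunEnd s j : Nat) : Int) - ((j : Nat) : Int)).toNat = s2tRunEnd s j - j := by
            omega
          rw [h5]
          rw [IH (s.length - s2tRunEnd s j) (by omega) (s2tRunEnd s j) rfl hEle fA fB (by omega) (by omega)]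
          have hz : s2tRunEnd s j / T.toNat - j / T.toNat = 0 := by omega
          rw [hz]
          simp [List.append_assoc]

-- ===== VERDICT (by name: the statement is the Claim_ definition above) =====
theorem spaces2Tabs_spec : Claim_equal_spaces2Tabs := by
  intro sIn tabSize _hDom hPre
  unfold Spec_spaces2Tabs spaces2Tabs spaces2Tabs_alt
  congr 1
  have h := s2t_main sIn.toList tabSize ?_ (sIn.toList.length) 0 rfl (by omega)
      (sIn.toList.length + 1) (sIn.toList.length + 1) (by omega) (by omega) []
  · simpa using h
  · rcases hPre with h0 | h0
    · exact Or.inl h0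
    · exact Or.inr h0
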